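-- pv_equiv track=rewrite | github.com/caselal/aoc-2023 | 03/day_03.py | track_numbers
-- ===== SOURCE A (Python) =====
-- def track_numbers(string):
--     numbers_list = []
--     numbers_index = []
--
--     for char_index, char in enumerate(string):
--         if char.isnumeric():
--             if char_index == 0:
--                 numbers_list.append(char)
--                 numbers_index.append([char_index])
--             elif string[char_index - 1].isnumeric():
--                 numbers_list[-1] += char
--                 numbers_index[-1].append(char_index)
--             else:
--                 numbers_list.append(char)
--                 numbers_index.append([char_index])
--
--     return numbers_list, numbers_index
-- ===== SOURCE B (Python) =====
-- def track_numbers(string):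
--     numbers_list = []
--     numbers_index = []
--     i, n = 0, len(string)
--     while i < n:
--         if string[i].isnumeric():
--             j = i
--             while j < n and string[j].isnumeric():
--                 j += 1
--             numbers_list.append(string[i:j])
--             numbers_index.append(list(range(i, j)))
--             i = j
--         else:
--             i += 1
--     return numbers_list, numbers_index
-- ===== Notes on version B (the rewrite author's own statement) =====
-- stated objective: alternative
-- what changed: A tracks per-character state by re-testing whether the previous character was numeric and mutating the last accumulated entry; B scans with an index and slices out each maximal digit run in one inner loop, appending string[i:j] and list(range(i,j)) whole.
import Mathlib
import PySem

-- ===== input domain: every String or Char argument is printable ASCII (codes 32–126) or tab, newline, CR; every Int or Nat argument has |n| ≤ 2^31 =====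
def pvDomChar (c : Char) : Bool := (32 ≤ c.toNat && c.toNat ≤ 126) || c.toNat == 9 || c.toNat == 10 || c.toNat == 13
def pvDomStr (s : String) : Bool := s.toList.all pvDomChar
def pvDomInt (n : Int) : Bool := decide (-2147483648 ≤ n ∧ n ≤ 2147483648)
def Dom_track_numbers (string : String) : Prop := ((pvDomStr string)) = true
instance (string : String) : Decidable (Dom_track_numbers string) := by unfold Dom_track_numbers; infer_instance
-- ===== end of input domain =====

-- B replaces A's per-character "was the previous char numeric" state machine by a direct
-- two-level index scan that slices out each maximal digit run (objective: alternative).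
-- char.isnumeric() is ported as PySem.Chars.isdigit, exact on the ASCII domain Dom_track_numbers.


-- ===== PORT A =====
-- numbers_list[-1] += char / numbers_index[-1].append(i): in-place update of the last element
def appendLast {α : Type} (l : List (List α)) (x : α) : List (List α) :=
  match l with
  | [] => []
  | [r] => [r ++ [x]]
  | r :: rs => r :: appendLast rs x

-- the loop body of A (strings carried as List Char, joined by String.mk at the end)
def aStep (s : String) (st : List (List Char) × List (List Int)) (p : Int × Char) :
    List (List Char) × List (List Int) :=
  if PySem.Chars.isdigit p.2 then
    if p.1 = 0 then (st.1 ++ [[p.2]], st.2 ++ [[p.1]])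
    else if ((PySem.Str.pyGet? s (p.1 - 1)).map PySem.Chars.isdigit).getD false then
      (appendLast st.1 p.2, appendLast st.2 p.1)
    else (st.1 ++ [[p.2]], st.2 ++ [[p.1]])
  else st

def track_numbers (string : String) : List String × List (List Int) :=
  let st := (PySem.List.enumerate string.toList 0).foldl (aStep string) ([], [])
  (st.1.map String.mk, st.2)

-- ===== PORT B =====
-- Source B's outer while-loop: skip one non-digit, or slice off the maximal digit run
-- (the inner `while j < n and string[j].isnumeric(): j += 1` is the takeWhile/dropWhile scan)
def altGo (cs : List Char) (i : Int) : List String × List (List Int) :=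
  match cs with
  | [] => ([], [])
  | c :: rest =>
    if PySem.Chars.isdigit c then
      let run := (c :: rest).takeWhile PySem.Chars.isdigit
      let rec_ := altGo ((c :: rest).dropWhile PySem.Chars.isdigit) (i + run.length)
      (String.mk run :: rec_.1, PySem.List.pyRange i (i + run.length) 1 :: rec_.2)
    else altGo rest (i + 1)
termination_by cs.length
decreasing_by
  · rename_i h
    simp only [List.dropWhile_cons_of_pos h]
    exact Nat.lt_succ_of_le (List.length_dropWhile_le _ _)
  · simp

def track_numbers_alt (string : String) : List String × List (List Int) :=
  altGo string.toList 0

-- ===== PRECONDITION & SPEC =====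
def Spec_track_numbers (string : String) (out : List String × List (List Int)) : Prop := out = track_numbers_alt string
instance (string : String) (out : List String × List (List Int)) : Decidable (Spec_track_numbers string out) := by unfold Spec_track_numbers; infer_instance

-- ===== CLAIM (what is proved, stated in full; the proofs are below) =====
def Claim_equal_track_numbers : Prop := ∀ (string : String), Dom_track_numbers string → Spec_track_numbers string (track_numbers string)

-- ===== LEMMAS AND PROOFS =====

-- proof-side mirror of altGo on char lists, with cons-recursive index lists
def idxs (k m : Nat) : List Int :=
  match m with
  | 0 => []
  | m + 1 => (k : Int) :: idxs (k + 1) m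

def gsC (cs : List Char) (k : Nat) : List (List Char) × List (List Int) :=
  match cs with
  | [] => ([], [])
  | c :: rest =>
    if PySem.Chars.isdigit c then
      let run := (c :: rest).takeWhile PySem.Chars.isdigit
      let rec_ := gsC ((c :: rest).dropWhile PySem.Chars.isdigit) (k + run.length)
      (run :: rec_.1, idxs k run.length :: rec_.2)
    else gsC rest (k + 1)
termination_by cs.length
decreasing_by
  · rename_i h
    simp only [List.dropWhile_cons_of_pos h]
    exact Nat.lt_succ_of_le (List.length_dropWhile_le _ _)
  · simp

lemma appendLast_append {α : Type} (l : List (List α)) (r : List α) (x : α) :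
    appendLast (l ++ [r]) x = l ++ [r ++ [x]] := by
  induction l with
  | nil => rfl
  | cons a t ih =>
    cases t with
    | nil => simp [appendLast]
    | cons b u => simp [appendLast] at ih ⊢; simpa using ih

lemma pyRange_eq_idxs (k m : Nat) :
    PySem.List.pyRange (k : Int) ((k : Int) + (m : Int)) 1 = idxs k m := by
  induction m generalizing k with
  | zero => simp [idxs, PySem.List.pyRange]
  | succ m ih =>
    rw [PySem.List.pyRange_one_cons (by omega)]
    simp only [idxs]
    have := ih (k + 1)
    push_cast at this ⊢
    rw [show (k : Int) + 1 + (m : Int) = (k : Int) + ((m : Int) + 1) by ring] at this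
    simpa using this

lemma altGo_eq_gsC (cs : List Char) (k : Nat) :
    altGo cs (k : Int) = ((gsC cs k).1.map String.mk, (gsC cs k).2) := by
  induction cs, k using gsC.induct with
  | case1 k => simp [altGo, gsC]
  | case2 k c rest h run ih =>
    rw [altGo, gsC]
    simp only [h, if_pos]
    have hc : ((k : Int) + ((c :: rest).takeWhile PySem.Chars.isdigit).length)
        = ((k + ((c :: rest).takeWhile PySem.Chars.isdigit).length : Nat) : Int) := by push_cast; ring
    rw [pyRange_eq_idxs, hc, ih]
    simp only [List.map_cons, Prod.mk.injEq, List.cons.injEq, true_and]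
    exact ⟨rfl, rfl⟩
  | case3 k c rest h ih =>
    rw [altGo, gsC]
    simp only [h, if_neg, Bool.false_eq_true, not_false_iff]
    have hc : ((k : Int) + 1) = ((k + 1 : Nat) : Int) := by push_cast; ring
    rw [hc, ih]

-- the main invariant: P (boundary) and Q (inside a run), proved together by induction on the suffix
lemma main_inv (s : String) (t : List Char) : ∀ (k : Nat), s.toList.drop k = t →
    (((k = 0 ∨ ((s.toList[k-1]?).map PySem.Chars.isdigit).getD false = false)) →
      ∀ nl ni, (PySem.List.enumerate t (k : Int)).foldl (aStep s) (nl, ni)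
        = (nl ++ (gsC t k).1, ni ++ (gsC t k).2))
    ∧ (0 < k → ((s.toList[k-1]?).map PySem.Chars.isdigit).getD false = true →
      ∀ nl0 r ni0 q, (PySem.List.enumerate t (k : Int)).foldl (aStep s) (nl0 ++ [r], ni0 ++ [q])
        = (nl0 ++ (r ++ t.takeWhile PySem.Chars.isdigit)
              :: (gsC (t.dropWhile PySem.Chars.isdigit) (k + (t.takeWhile PySem.Chars.isdigit).length)).1,
           ni0 ++ (q ++ idxs k (t.takeWhile PySem.Chars.isdigit).length)
              :: (gsC (t.dropWhile PySem.Chars.isdigit) (k + (t.takeWhile PySem.Chars.isdigit).length)).2)) := by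
  induction t with
  | nil =>
    intro k _
    constructor
    · intro _ nl ni; simp [PySem.List.enumerate, gsC]
    · intro _ _ nl0 r ni0 q; simp [PySem.List.enumerate, gsC, idxs]
  | cons c rest ih =>
    intro k hdrop
    have hrest : s.toList.drop (k+1) = rest := by
      rw [← List.tail_drop, hdrop]; rfl
    have hk : s.toList[k]? = some c := by
      have h0 : (s.toList.drop k)[0]? = s.toList[k + 0]? := List.getElem?_drop
      rw [hdrop] at h0; simpa using h0.symm
    have ihP := (ih (k+1) hrest).1
    have ihQ := (ih (k+1) hrest).2
    have hcast1 : ((k : Int) + 1) = ((k + 1 : Nat) : Int) := by push_cast; ring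
    constructor
    · -- boundary case
      intro hb nl ni
      by_cases h : PySem.Chars.isdigit c = true
      · have hstep : aStep s (nl, ni) ((k:Int), c) = (nl ++ [[c]], ni ++ [[(k:Int)]]) := by
          by_cases hk0 : k = 0
          · subst hk0; simp [aStep, h]
          · have hprev : ((s.toList[k-1]?).map PySem.Chars.isdigit).getD false = false :=
              hb.resolve_left hk0
            have hcast : ((k:Int) - 1) = ((k-1 : Nat) : Int) := by omega
            simp [aStep, h, hcast, hprev, hk0]
        rw [PySem.List.enumerate_cons, List.foldl_cons, hstep, hcast1]
        have hd1 : ((s.toList[(k+1)-1]?).map PySem.Chars.isdigit).getD false = true := by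
          simp [hk, h]
        rw [ihQ (by omega) hd1 nl [c] ni [(k:Int)]]
        simp [gsC, h, List.takeWhile_cons_of_pos h, List.dropWhile_cons_of_pos h, idxs]
        constructor
        · congr 2; omega
        · congr 2; omega
      · rw [PySem.List.enumerate_cons, List.foldl_cons]
        have hstep : aStep s (nl, ni) ((k:Int), c) = (nl, ni) := by simp [aStep, h]
        rw [hstep, hcast1, ihP (Or.inr (by simp [hk, h]))]
        simp [gsC, h]
    · -- inside-a-run case
      intro hkpos hdprev nl0 r ni0 q
      by_cases h : PySem.Chars.isdigit c = true
      · have hstep : aStep s (nl0 ++ [r], ni0 ++ [q]) ((k:Int), c)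
            = (nl0 ++ [r ++ [c]], ni0 ++ [q ++ [(k:Int)]]) := by
          have hk0 : k ≠ 0 := by omega
          have hcast : ((k:Int) - 1) = ((k-1 : Nat) : Int) := by omega
          simp [aStep, h, hcast, hdprev, appendLast_append, hk0]
        rw [PySem.List.enumerate_cons, List.foldl_cons, hstep, hcast1]
        have hd1 : ((s.toList[(k+1)-1]?).map PySem.Chars.isdigit).getD false = true := by
          simp [hk, h]
        rw [ihQ (by omega) hd1 nl0 (r ++ [c]) ni0 (q ++ [(k:Int)])]
        simp [List.takeWhile_cons_of_pos h, List.dropWhile_cons_of_pos h, idxs]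
        constructor
        · congr 2; omega
        · congr 2; omega
      · rw [PySem.List.enumerate_cons, List.foldl_cons]
        have hstep : aStep s (nl0 ++ [r], ni0 ++ [q]) ((k:Int), c) = (nl0 ++ [r], ni0 ++ [q]) := by
          simp [aStep, h]
        rw [hstep, hcast1, ihP (Or.inr (by simp [hk, h])) (nl0 ++ [r]) (ni0 ++ [q])]
        simp [gsC, h, List.takeWhile_cons_of_neg h, List.dropWhile_cons_of_neg h, idxs]

-- ===== VERDICT (by name: the statement is the Claim_ definition above) =====
theorem track_numbers_spec : Claim_equal_track_numbers := by
  intro s _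
  unfold Spec_track_numbers track_numbers track_numbers_alt
  have h := (main_inv s s.toList 0 (by simp)).1 (Or.inl rfl) [] []
  have h2 := altGo_eq_gsC s.toList 0
  simp only [Nat.cast_zero] at h h2
  rw [h2, h]
  simp
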